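-- pv_equiv track=rewrite | github.com/santischuckmann/pythongame | funcionesVACIAS.py | Puntos
-- ===== SOURCE A (Python) =====
-- def Puntos(candidata):
--     #devuelve el puntaje que le corresponde a candidata
--     puntos = 0
--     for letra in candidata:
--         if letra in "aeiouAEIOU":
--             puntos = puntos + 1
--         elif letra in "bcdfghlmnoprstBCDFGHLMNOPRST":
--             puntos = puntos + 2
--         elif letra in "jkqwxyzJQWXYZ":
--             puntos = puntos + 5
--     return puntos
-- ===== SOURCE B (Python) =====
-- def Puntos(candidata):
--     # Points table (later entries overwrite earlier ones, so vowels take priority,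
--     # matching A's first-match if/elif order), then a single counting pass.
--     table = {**{c: 5 for c in "jkqwxyzJQWXYZ"},
--              **{c: 2 for c in "bcdfghlmnoprstBCDFGHLMNOPRST"},
--              **{c: 1 for c in "aeiouAEIOU"}}
--     freq = {}
--     for c in candidata:
--         freq[c] = freq.get(c, 0) + 1
--     return sum(n * table.get(c, 0) for c, n in freq.items())
-- ===== Notes on version B (the rewrite author's own statement) =====
-- stated objective: alternative
-- what changed: Replaces A's per-character if/elif chain accumulation by a merged points lookup table plus a character-frequency dictionary, returning the sum of count*points over the distinct characters.
import Mathlib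
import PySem

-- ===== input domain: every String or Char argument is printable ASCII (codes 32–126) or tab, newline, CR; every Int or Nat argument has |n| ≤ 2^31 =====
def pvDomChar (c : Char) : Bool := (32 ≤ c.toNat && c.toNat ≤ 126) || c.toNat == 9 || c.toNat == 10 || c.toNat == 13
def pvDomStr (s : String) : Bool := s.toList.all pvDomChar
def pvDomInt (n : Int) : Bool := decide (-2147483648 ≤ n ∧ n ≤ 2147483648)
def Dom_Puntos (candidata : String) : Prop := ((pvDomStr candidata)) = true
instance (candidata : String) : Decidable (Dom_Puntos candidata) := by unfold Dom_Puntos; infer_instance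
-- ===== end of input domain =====

-- B replaces A's per-character if/elif scoring chain by a merged points lookup table
-- plus a character-frequency dictionary (objective: alternative decomposition, same cost).


set_option maxRecDepth 4096

-- ===== PORT A =====
def Puntos (candidata : String) : Int :=
  candidata.toList.foldl (fun puntos letra =>
    if ("aeiouAEIOU".toList).contains letra then puntos + 1
    else if ("bcdfghlmnoprstBCDFGHLMNOPRST".toList).contains letra then puntos + 2
    else if ("jkqwxyzJQWXYZ".toList).contains letra then puntos + 5
    else puntos) 0

-- ===== PORT B =====
-- table = {**{c:5 for c in …}, **{c:2 for c in …}, **{c:1 for c in …}}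
def pvTable : PySem.Dict Char Int :=
  let t := "jkqwxyzJQWXYZ".toList.foldl (fun d c => d.insert c 5) PySem.Dict.empty
  let t := "bcdfghlmnoprstBCDFGHLMNOPRST".toList.foldl (fun d c => d.insert c 2) t
  "aeiouAEIOU".toList.foldl (fun d c => d.insert c 1) t

def Puntos_alt (candidata : String) : Int :=
  let freq := candidata.toList.foldl (fun d c => d.insert c (d.getD c 0 + 1)) PySem.Dict.empty
  (freq.items.map (fun p => p.2 * pvTable.getD p.1 0)).sum

-- ===== PRECONDITION & SPEC =====
def Spec_Puntos (candidata : String) (out : Int) : Prop := out = Puntos_alt candidata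
instance (candidata : String) (out : Int) : Decidable (Spec_Puntos candidata out) := by unfold Spec_Puntos; infer_instance

-- ===== CLAIM (what is proved, stated in full; the proofs are below) =====
def Claim_equal_Puntos : Prop := ∀ (candidata : String), Dom_Puntos candidata → Spec_Puntos candidata (Puntos candidata)

-- ===== LEMMAS AND PROOFS =====

-- The per-character score of A's if/elif chain.
def pvScore (c : Char) : Int :=
  if ("aeiouAEIOU".toList).contains c then 1
  else if ("bcdfghlmnoprstBCDFGHLMNOPRST".toList).contains c then 2
  else if ("jkqwxyzJQWXYZ".toList).contains c then 5
  else 0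

theorem pvFoldA (xs : List Char) (i : Int) :
    xs.foldl (fun puntos letra =>
      if ("aeiouAEIOU".toList).contains letra then puntos + 1
      else if ("bcdfghlmnoprstBCDFGHLMNOPRST".toList).contains letra then puntos + 2
      else if ("jkqwxyzJQWXYZ".toList).contains letra then puntos + 5
      else puntos) i = i + (xs.map pvScore).sum := by
  induction xs generalizing i with
  | nil => simp
  | cons x xs ih =>
    simp only [List.foldl_cons, List.map_cons, List.sum_cons, ih]
    unfold pvScore
    split_ifs <;> ring

-- The merged table realises A's first-match scores, for every character.
theorem pvTbl_getD (c : Char) : pvTable.getD c 0 = pvScore c := by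
  by_cases h1 : c ∈ "aeiouAEIOU".toList
  · rw [show "aeiouAEIOU".toList = ['a','e','i','o','u','A','E','I','O','U'] from rfl] at h1
    fin_cases h1 <;> decide
  · by_cases h2 : c ∈ "bcdfghlmnoprstBCDFGHLMNOPRST".toList
    · rw [show "bcdfghlmnoprstBCDFGHLMNOPRST".toList = ['b','c','d','f','g','h','l','m','n','o','p','r','s','t','B','C','D','F','G','H','L','M','N','O','P','R','S','T'] from rfl] at h2
      fin_cases h2 <;> decide
    · by_cases h3 : c ∈ "jkqwxyzJQWXYZ".toList
      · rw [show "jkqwxyzJQWXYZ".toList = ['j','k','q','w','x','y','z','J','Q','W','X','Y','Z'] from rfl] at h3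
        fin_cases h3 <;> decide
      · simp only [show ("aeiouAEIOU".toList) = ['a','e','i','o','u','A','E','I','O','U'] from rfl] at h1
        simp only [show ("bcdfghlmnoprstBCDFGHLMNOPRST".toList) = ['b','c','d','f','g','h','l','m','n','o','p','r','s','t','B','C','D','F','G','H','L','M','N','O','P','R','S','T'] from rfl] at h2
        simp only [show ("jkqwxyzJQWXYZ".toList) = ['j','k','q','w','x','y','z','J','Q','W','X','Y','Z'] from rfl] at h3
        simp only [List.mem_cons, List.not_mem_nil, or_false, not_or] at h1 h2 h3
        have hsc : pvScore c = 0 := by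
          simp [pvScore, List.contains_eq_mem, h1, h2, h3]
        rw [hsc]
        rw [show pvTable = PySem.Dict.mk [('j',5),('k',5),('q',5),('w',5),('x',5),('y',5),('z',5),('J',5),('Q',5),('W',5),('X',5),('Y',5),('Z',5),('b',2),('c',2),('d',2),('f',2),('g',2),('h',2),('l',2),('m',2),('n',2),('o',1),('p',2),('r',2),('s',2),('t',2),('B',2),('C',2),('D',2),('F',2),('G',2),('H',2),('L',2),('M',2),('N',2),('O',1),('P',2),('R',2),('S',2),('T',2),('a',1),('e',1),('i',1),('u',1),('A',1),('E',1),('I',1),('U',1)] from rfl]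
        obtain ⟨a1,a2,a3,a4,a5,a6,a7,a8,a9,a10⟩ := h1
        obtain ⟨b1,b2,b3,b4,b5,b6,b7,b8,b9,-,b11,b12,b13,b14,b15,b16,b17,b18,b19,b20,b21,b22,b23,-,b25,b26,b27,b28⟩ := h2
        obtain ⟨c1,c2,c3,c4,c5,c6,c7,c8,c9,c10,c11,c12,c13⟩ := h3
        simp [PySem.Dict.getD, PySem.Dict.get?,
          Ne.symm a1, Ne.symm a2, Ne.symm a3, Ne.symm a4, Ne.symm a5, Ne.symm a6, Ne.symm a7, Ne.symm a8, Ne.symm a9, Ne.symm a10,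
          Ne.symm b1, Ne.symm b2, Ne.symm b3, Ne.symm b4, Ne.symm b5, Ne.symm b6, Ne.symm b7, Ne.symm b8, Ne.symm b9,
          Ne.symm b11, Ne.symm b12, Ne.symm b13, Ne.symm b14, Ne.symm b15, Ne.symm b16, Ne.symm b17, Ne.symm b18, Ne.symm b19, Ne.symm b20,
          Ne.symm b21, Ne.symm b22, Ne.symm b23, Ne.symm b25, Ne.symm b26, Ne.symm b27, Ne.symm b28,
          Ne.symm c1, Ne.symm c2, Ne.symm c3, Ne.symm c4, Ne.symm c5, Ne.symm c6, Ne.symm c7, Ne.symm c8, Ne.symm c9, Ne.symm c10,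
          Ne.symm c11, Ne.symm c12, Ne.symm c13]

theorem pvSum_if_not_mem (f : Char → Int) (S : List Char) (x : Char) (hx : x ∉ S) :
    (S.map (fun k => if k = x then f k else 0)).sum = 0 := by
  induction S with
  | nil => simp
  | cons s S ih =>
    simp only [List.mem_cons, not_or] at hx
    simp only [List.map_cons, List.sum_cons, ih hx.2, add_zero]
    rw [if_neg (fun h => hx.1 h.symm)]

theorem pvSum_if_mem (f : Char → Int) (S : List Char) (x : Char) (hS : S.Nodup) (hx : x ∈ S) :
    (S.map (fun k => if k = x then f k else 0)).sum = f x := by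
  induction S with
  | nil => cases hx
  | cons s S ih =>
    rcases List.mem_cons.mp hx with h | h
    · subst h
      simp [pvSum_if_not_mem f S x (List.nodup_cons.mp hS).1]
    · have hne : s ≠ x := fun e => (List.nodup_cons.mp hS).1 (e ▸ h)
      simp only [List.map_cons, List.sum_cons, if_neg hne, zero_add]
      exact ih (List.nodup_cons.mp hS).2 h

theorem pvSum_count (f : Char → Int) (S : List Char) (hS : S.Nodup) :
    ∀ xs : List Char, (∀ x ∈ xs, x ∈ S) →
      (S.map (fun k => ((xs.count k : Int)) * f k)).sum = (xs.map f).sum := by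
  intro xs
  induction xs with
  | nil => intro _; simp
  | cons x xs ih =>
    intro hsub
    have hx : x ∈ S := hsub x (by simp)
    have h1 : (S.map (fun k => (((x :: xs).count k : Int)) * f k)).sum
        = (S.map (fun k => ((xs.count k : Int)) * f k + (if k = x then f k else 0))).sum := by
      apply congrArg List.sum
      apply List.map_congr_left
      intro k _
      by_cases hk : k = x
      · subst hk; simp [List.count_cons_self]; ring
      · simp [List.count_cons, hk]; exact Or.inl (fun h => hk h.symm)
    rw [h1, PySem.List.sum_map_add_int, pvSum_if_mem f S x hS hx,
      ih (fun y hy => hsub y (by simp [hy]))]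
    simp [add_comm]

-- ===== VERDICT (by name: the statement is the Claim_ definition above) =====
theorem Puntos_spec : Claim_equal_Puntos := by
  intro candidata _
  unfold Spec_Puntos Puntos Puntos_alt
  rw [pvFoldA, zero_add]
  rw [show candidata.toList.foldl (fun d c => d.insert c (d.getD c 0 + 1)) PySem.Dict.empty
      = PySem.Dict.counter candidata.toList from
    PySem.Dict.foldl_insert_getD_add_one_eq_counter candidata.toList]
  simp only [PySem.Dict.items_counter, List.map_map]
  have h2 : ((PySem.Set.ofList candidata.toList).map
      ((fun p : Char × Int => p.2 * pvTable.getD p.1 0) ∘ fun k => (k, (candidata.toList.count k : Int)))).sum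
      = ((PySem.Set.ofList candidata.toList).map
        (fun k => ((candidata.toList.count k : Int)) * pvScore k)).sum := by
    apply congrArg List.sum
    apply List.map_congr_left
    intro k _
    simp [pvTbl_getD k]
  rw [h2, pvSum_count pvScore _ (PySem.Set.nodup_ofList _) candidata.toList
    (fun x hx => (PySem.Set.mem_ofList _ _).mpr hx)]
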